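-- pv_equiv track=rewrite | github.com/Kappaprideer/ASD | BitAlgo/Grafy/09_05_2022/Zad2.py | BFS
-- ===== SOURCE A (Python) =====
-- from collections import deque
--
-- def BFS(G):
--     visited=[ 0 for _ in range(len(G))]
--     day=-1
--     maximum=0
--     ppl = [ 0 for _ in range(len(G))]
--     d = [ 10**10 for _ in range(len(G))]
--     Q=deque()
--     Q.append(0)
--     d[0]=0
--     visited[0]=1
--     while len(Q)>0:
--         s=Q.popleft()
--         for u in G[s]:
--             if visited[u]==0:
--                 visited[u]=1
--                 Q.append(u)
--                 d[u]=d[s]+1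
--                 ppl[d[u]]+=1
--                 if ppl[d[u]]>maximum:
--                     maximum=ppl[d[u]]
--                     day=d[u]
--     return day, ppl[day]
-- ===== SOURCE B (Python) =====
-- def BFS(G):
--     n = len(G)
--     seen = [False] * n
--     seen[0] = True
--     frontier = [0]
--     counts = []
--     while frontier:
--         nxt = []
--         for s in frontier:
--             for u in G[s]:
--                 if not seen[u]:
--                     seen[u] = True
--                     nxt.append(u)
--         if nxt:
--             counts.append(len(nxt))
--         frontier = nxt
--     day, best = -1, 0
--     for i, c in enumerate(counts):
--         if c > best:
--             day, best = i + 1, c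
--     return day, best
-- ===== Notes on version B (the rewrite author's own statement) =====
-- stated objective: alternative
-- what changed: A's deque-based BFS that interleaves per-level people counting (ppl[d[u]]) and running-maximum tracking into the discovery loop is replaced by a frontier-by-frontier BFS (no deque, no distance array, no per-node-indexed count table) that collects the list of level sizes and then finds the first level of maximal size in a separate scan.
import Mathlib
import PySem

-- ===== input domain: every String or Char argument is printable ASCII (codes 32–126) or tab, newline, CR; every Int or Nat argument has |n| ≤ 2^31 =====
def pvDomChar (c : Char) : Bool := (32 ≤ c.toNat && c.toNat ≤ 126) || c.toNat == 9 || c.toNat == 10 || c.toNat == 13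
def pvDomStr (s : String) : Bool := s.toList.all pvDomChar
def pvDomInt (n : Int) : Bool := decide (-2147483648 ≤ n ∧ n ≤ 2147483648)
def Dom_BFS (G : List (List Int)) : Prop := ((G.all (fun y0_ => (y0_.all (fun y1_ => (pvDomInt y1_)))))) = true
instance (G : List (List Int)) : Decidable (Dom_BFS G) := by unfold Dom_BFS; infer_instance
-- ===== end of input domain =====

-- B replaces A's deque-with-interleaved-maximum-tracking by a frontier-by-frontier BFS that
-- collects the per-level sizes and a separate scan for the first level of maximal size
-- (objective: alternative — same asymptotic cost, different algorithmic decomposition).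

-- shared index/bridge helpers (Python list index semantics, used by both ports' termination lemmas)
def pvIx (n : Nat) (i : Int) : Nat := (if i < 0 then i + n else i).toNat

lemma pvGetD_eq {α : Type} (xs : List α) (i : Int) (d : α) (h : PySem.Raise.InRange xs.length i) :
    PySem.List.pyGetD xs i d = xs.getD (pvIx xs.length i) d := by
  obtain ⟨h1, h2⟩ := h
  by_cases hp : 0 ≤ i
  · have hi : pvIx xs.length i = i.toNat := by simp [pvIx]; omega
    have hlt : i.toNat < xs.length := by omega
    rw [hi, List.getD_eq_getElem _ _ hlt]
    simp [PySem.List.pyGetD, PySem.List.pyGet?, PySem.List.pyIdx?, hp, h2]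
  · have hi : pvIx xs.length i = xs.length - (-i).toNat := by simp [pvIx]; omega
    have hlt : xs.length - (-i).toNat < xs.length := by omega
    rw [hi, List.getD_eq_getElem _ _ hlt]
    simp [PySem.List.pyGetD, PySem.List.pyGet?, PySem.List.pyIdx?, hp, h1,
      List.getElem?_eq_getElem hlt]

lemma pvSetD_eq {α : Type} (xs : List α) (i : Int) (v : α) (h : PySem.Raise.InRange xs.length i) :
    PySem.List.pySetD xs i v = xs.set (pvIx xs.length i) v := by
  obtain ⟨h1, h2⟩ := h
  by_cases hp : 0 ≤ i
  · have hi : pvIx xs.length i = i.toNat := by simp [pvIx]; omega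
    simp [PySem.List.pySetD, PySem.List.pySet?, PySem.List.pyIdx?, hp, h2, hi]
  · have hi : pvIx xs.length i = xs.length - (-i).toNat := by simp [pvIx]; omega
    simp [PySem.List.pySetD, PySem.List.pySet?, PySem.List.pyIdx?, hp, h1, hi]

lemma pvGetD_out {α : Type} (xs : List α) (i : Int) (d : α) (h : ¬ PySem.Raise.InRange xs.length i) :
    PySem.List.pyGetD xs i d = d := by
  simp [PySem.Raise.InRange] at h
  by_cases hp : 0 ≤ i
  · have : ¬ (i < (xs.length : Int)) := by omega
    simp [PySem.List.pyGetD, PySem.List.pyGet?, PySem.List.pyIdx?, hp, this]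
  · have : ¬ (-(xs.length:Int) ≤ i) := by omega
    simp [PySem.List.pyGetD, PySem.List.pyGet?, PySem.List.pyIdx?, hp, this]

lemma pvIx_lt (n : Nat) (i : Int) (h : PySem.Raise.InRange n i) : pvIx n i < n := by
  obtain ⟨h1,h2⟩ := h; simp [pvIx]; split_ifs <;> omega

-- ===== PORT A =====
structure pvStA where
  vis : List Int
  day : Int
  mx : Int
  ppl : List Int
  d : List Int
  q : List Int

-- body of A's inner 'for u in G[s]' loop
def pvNbA (s : Int) (st : pvStA) (u : Int) : pvStA :=
  if PySem.List.pyGetD st.vis u 1 = 0 then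
    let vis := PySem.List.pySetD st.vis u 1
    let q := st.q ++ [u]
    let du := PySem.List.pyGetD st.d s 0 + 1
    let d := PySem.List.pySetD st.d u du
    let ppl := PySem.List.pySetD st.ppl du (PySem.List.pyGetD st.ppl du 0 + 1)
    if PySem.List.pyGetD ppl du 0 > st.mx then
      ⟨vis, du, PySem.List.pyGetD ppl du 0, ppl, d, q⟩
    else
      ⟨vis, st.day, st.mx, ppl, d, q⟩
  else st

def pvMeas (st : pvStA) : Nat := st.q.length + st.vis.count 0

lemma pvMeasA_nbA_le (s : Int) (st : pvStA) (u : Int) : pvMeas (pvNbA s st u) ≤ pvMeas st := by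
  unfold pvNbA
  by_cases hg : PySem.List.pyGetD st.vis u 1 = 0
  · have hr : PySem.Raise.InRange st.vis.length u := by
      by_contra hr
      rw [pvGetD_out st.vis u 1 hr] at hg
      exact absurd hg (by norm_num)
    have hlt := pvIx_lt st.vis.length u hr
    have hx : st.vis[pvIx st.vis.length u] = 0 := by
      have h2 := pvGetD_eq st.vis u 1 hr
      rw [List.getD_eq_getElem _ _ hlt] at h2
      rw [← h2]; exact hg
    have hcnt : (PySem.List.pySetD st.vis u 1).count 0 + 1 = st.vis.count 0 := by
      rw [pvSetD_eq st.vis u 1 hr, List.count_set hlt]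
      have hpos : 0 < st.vis.count 0 := List.count_pos_iff.mpr (hx ▸ List.getElem_mem hlt)
      simp [hx]
      omega
    rw [if_pos hg]
    dsimp only
    split_ifs <;> simp [pvMeas] <;> omega
  · rw [if_neg hg]

lemma pvMeasA_fold_le (ns : List Int) (s : Int) (st : pvStA) :
    pvMeas (ns.foldl (pvNbA s) st) ≤ pvMeas st := by
  induction ns generalizing st with
  | nil => simp
  | cons u t ih =>
      simp only [List.foldl_cons]
      exact le_trans (ih _) (pvMeasA_nbA_le s st u)

def pvLoopA (G : List (List Int)) (st : pvStA) : Int × Int :=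
  match h : st.q with
  | [] => (st.day, PySem.List.pyGetD st.ppl st.day 0)
  | s :: qt => pvLoopA G ((PySem.List.pyGetD G s []).foldl (pvNbA s) { st with q := qt })
termination_by pvMeas st
decreasing_by
  calc pvMeas _ ≤ pvMeas { st with q := qt } := pvMeasA_fold_le _ _ _
  _ < pvMeas st := by simp [pvMeas, h]

def BFS (G : List (List Int)) : Int × Int :=
  let n := G.length
  let visited := List.replicate n (0 : Int)
  let ppl := List.replicate n (0 : Int)
  let d := PySem.List.pySetD (List.replicate n ((10:Int)^10)) 0 0
  let visited := PySem.List.pySetD visited 0 1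
  pvLoopA G ⟨visited, -1, 0, ppl, d, [0]⟩

-- ===== PORT B =====
-- body of B's inner 'for u in G[s]' loop: state is (seen, nxt)
def pvNbB (sn : List Bool × List Int) (u : Int) : List Bool × List Int :=
  if PySem.List.pyGetD sn.1 u true = false then
    (PySem.List.pySetD sn.1 u true, sn.2 ++ [u])
  else sn

-- 'for s in frontier'
def pvStepB (G : List (List Int)) (sn : List Bool × List Int) (s : Int) : List Bool × List Int :=
  (PySem.List.pyGetD G s []).foldl pvNbB sn

lemma pvCntB_nbB (sn : List Bool × List Int) (u : Int) :
    (pvNbB sn u).1.count false + (pvNbB sn u).2.length = sn.1.count false + sn.2.length := by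
  unfold pvNbB
  by_cases hg : PySem.List.pyGetD sn.1 u true = false
  · by_cases hr : PySem.Raise.InRange sn.1.length u
    · have hlt := pvIx_lt sn.1.length u hr
      have hx : sn.1[pvIx sn.1.length u] = false := by
        have := pvGetD_eq sn.1 u true hr
        rw [List.getD_eq_getElem _ _ hlt] at this
        rw [← this]; exact hg
      have hmem : false ∈ sn.1 := hx ▸ List.getElem_mem hlt
      have hpos : 0 < sn.1.count false := List.count_pos_iff.mpr hmem
      simp only [hg, if_pos]
      rw [pvSetD_eq sn.1 u true hr, List.count_set hlt]
      simp [hx]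
      omega
    · exfalso; rw [pvGetD_out sn.1 u true hr] at hg; simp at hg
  · simp [hg]

lemma pvCntB_fold (ns : List Int) (sn : List Bool × List Int) :
    (ns.foldl pvNbB sn).1.count false + (ns.foldl pvNbB sn).2.length
      = sn.1.count false + sn.2.length := by
  induction ns generalizing sn with
  | nil => rfl
  | cons u t ih => simp only [List.foldl_cons]; rw [ih]; exact pvCntB_nbB sn u

lemma pvCntB_front (G : List (List Int)) (fr : List Int) (sn : List Bool × List Int) :
    (fr.foldl (pvStepB G) sn).1.count false + (fr.foldl (pvStepB G) sn).2.length
      = sn.1.count false + sn.2.length := by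
  induction fr generalizing sn with
  | nil => rfl
  | cons s t ih => simp only [List.foldl_cons]; rw [ih]; exact pvCntB_fold _ sn

def pvLoopB (G : List (List Int)) (seen : List Bool) (frontier : List Int)
    (counts : List Int) : List Int :=
  match frontier with
  | [] => counts
  | _ :: _ =>
      let sn := frontier.foldl (pvStepB G) (seen, ([] : List Int))
      pvLoopB G sn.1 sn.2
        (if sn.2.isEmpty then counts else counts ++ [(sn.2.length : Int)])
termination_by 2 * seen.count false + (if frontier.isEmpty then 0 else 1)
decreasing_by
  simp only [List.foldl_attach]
  have h := pvCntB_front G frontier (seen, ([] : List Int))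
  rcases hn : (frontier.foldl (pvStepB G) (seen, ([] : List Int))).2 with _ | ⟨y, ys⟩
  · rw [hn] at h
    simp at h ⊢
    omega
  · rw [hn] at h
    simp at h ⊢
    omega
-- B's final scan: 'for i, c in enumerate(counts): if c > best: day, best = i+1, c'
def pvScan (counts : List Int) : Int × Int :=
  (PySem.List.enumerate counts 0).foldl
    (fun db ic => if ic.2 > db.2 then (ic.1 + 1, ic.2) else db) (-1, 0)

def BFS_alt (G : List (List Int)) : Int × Int :=
  let n := G.length
  let seen := PySem.List.pySetD (List.replicate n false) 0 true
  let counts := pvLoopB G seen [0] []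
  pvScan counts

-- ===== PRECONDITION & SPEC =====
-- Pre_ is exactly where A returns: the graph is nonempty (on [] both programs raise IndexError
-- at d[0] = 0 resp. seen[0] = True), and the component of node 0 never reaches an adjacency
-- entry outside [-len(G), len(G)) (on such an entry A raises IndexError at visited[u]) — stated
-- closed-form as the existence of a set of rows, containing node 0, with valid entries, closed
-- under the (wraparound-normalised) edges.  Entries of rows BFS never reaches are unconstrained.
def Pre_BFS (G : List (List Int)) : Prop :=
  G ≠ [] ∧ ∃ R : Finset (Fin G.length), (∃ i ∈ R, (i : Nat) = 0) ∧
    ∀ i ∈ R, ∀ u ∈ G.getD (i : Nat) [],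
      PySem.Raise.InRange G.length u ∧ ∃ j ∈ R, (j : Nat) = pvIx G.length u
instance (G : List (List Int)) : Decidable (Pre_BFS G) := by unfold Pre_BFS; infer_instance

def pvWitness_BFS : List (List Int) := [[1, 2], [0], [1]]

def Spec_BFS (G : List (List Int)) (out : Int × Int) : Prop := out = BFS_alt G
instance (G : List (List Int)) (out : Int × Int) : Decidable (Spec_BFS G out) := by
  unfold Spec_BFS; infer_instance

-- ===== CLAIM (what is proved, stated in full; the proofs are below) =====
def Claim_equal_BFS : Prop := ∀ (G : List (List Int)), Dom_BFS G → Pre_BFS G → Spec_BFS G (BFS G)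

-- ===== LEMMAS AND PROOFS =====

def pvEncode (seen : List Bool) : List Int := seen.map (fun b => if b then 1 else 0)

-- the ppl array of A as a function of the completed level sizes cs and the partial count of
-- the level currently being discovered (level cs.length + 1)
def pvPplOf (n : Nat) (cs : List Int) (part : Int) : List Int :=
  (List.range n).map (fun i =>
    if 1 ≤ i ∧ i ≤ cs.length then cs.getD (i-1) 0
    else if i = cs.length + 1 then part else 0)

-- the coupling invariant between A's loop state and B's (seen, frontier-rest q1, nxt, counts)
def pvInv (G : List (List Int)) (seen : List Bool) (q1 nxt : List Int) (d : List Int)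
    (cs : List Int) (day mx : Int) : Prop :=
  seen.length = G.length ∧ d.length = G.length ∧
  (∀ x ∈ q1, PySem.Raise.InRange G.length x ∧
      seen.getD (pvIx G.length x) false = true ∧
      d.getD (pvIx G.length x) 0 = (cs.length : Int)) ∧
  (∀ x ∈ nxt, PySem.Raise.InRange G.length x ∧
      seen.getD (pvIx G.length x) false = true ∧
      d.getD (pvIx G.length x) 0 = (cs.length : Int) + 1) ∧
  (∀ c ∈ cs, 1 ≤ c) ∧
  ((seen.count false : Int) = (G.length : Int) - (1 + cs.sum + nxt.length)) ∧
  (day, mx) = pvScan (cs ++ [(nxt.length : Int)])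

-- B's computation continued from a mid-level state
def pvBRest (G : List (List Int)) (seen : List Bool) (q1 nxt : List Int)
    (cs : List Int) : List Int :=
  let sn := q1.foldl (pvStepB G) (seen, nxt)
  if sn.2 = [] then cs else pvLoopB G sn.1 sn.2 (cs ++ [(sn.2.length : Int)])

lemma pvLoopB_nil_frontier (G : List (List Int)) (seen : List Bool) (cs : List Int) :
    pvLoopB G seen [] cs = cs := by
  rw [pvLoopB]

lemma pvLoopB_eq_bRest (G : List (List Int)) (seen : List Bool) (f : List Int)
    (cs : List Int) : pvLoopB G seen f cs = pvBRest G seen f [] cs := by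
  cases f with
  | nil => rw [pvLoopB]; simp [pvBRest]
  | cons a t =>
      rw [pvLoopB]
      simp only [pvBRest]
      rcases hn : ((a :: t).foldl (pvStepB G) (seen, ([] : List Int))).2 with _ | ⟨y, ys⟩
      · simp [hn, pvLoopB_nil_frontier]
      · simp [hn]

lemma pvScan_append (cs : List Int) (x : Int) :
    pvScan (cs ++ [x]) = if x > (pvScan cs).2 then ((cs.length : Int) + 1, x) else pvScan cs := by
  unfold pvScan
  rw [PySem.List.enumerate_append, List.foldl_append]
  rw [PySem.List.enumerate_cons, PySem.List.enumerate_nil]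
  simp

lemma pvScan_snd_nonneg (cs : List Int) : 0 ≤ (pvScan cs).2 := by
  induction cs using List.reverseRecOn with
  | nil => norm_num [pvScan, PySem.List.enumerate_nil]
  | append_singleton ys y ih =>
      rw [pvScan_append]
      split_ifs with h
      · simp; omega
      · exact ih

lemma pvScan_char (cs : List Int) (h : ∀ c ∈ cs, 1 ≤ c) (hne : cs ≠ []) :
    ∃ k : Nat, k < cs.length ∧ (pvScan cs).1 = (k : Int) + 1 ∧
      (pvScan cs).2 = cs.getD k 0 ∧ 1 ≤ (pvScan cs).2 := by
  induction cs using List.reverseRecOn with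
  | nil => exact absurd rfl hne
  | append_singleton ys y ih =>
      have hy : 1 ≤ y := h y (by simp)
      rw [pvScan_append]
      rcases eq_or_ne ys [] with hys | hys
      · subst hys
        have : y > (pvScan ([] : List Int)).2 := by
          norm_num [pvScan, PySem.List.enumerate_nil]; omega
        rw [if_pos this]
        exact ⟨0, by simp, by norm_num, by simp, by simpa⟩
      · obtain ⟨k, hk, h1, h2, h3⟩ := ih (fun c hc => h c (by simp [hc])) hys
        split_ifs with hgt
        · refine ⟨ys.length, by simp, by push_cast; ring, ?_, by simpa⟩
          rw [List.getD_eq_getElem _ _ (by simp), List.getElem_concat_length rfl]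
        · refine ⟨k, by simp; omega, h1, ?_, h3⟩
          rw [h2, List.getD_append _ _ _ _ hk]

lemma pvLen_le_sum (cs : List Int) (h : ∀ c ∈ cs, 1 ≤ c) : (cs.length : Int) ≤ cs.sum := by
  induction cs with
  | nil => simp
  | cons c t ih =>
      have := h c (by simp)
      have := ih (fun x hx => h x (by simp [hx]))
      simp [List.sum_cons]
      push_cast
      omega

lemma pvPplOf_getD (n : Nat) (cs : List Int) (part : Int) (i : Nat) (hi : i < n) (dflt : Int) :
    (pvPplOf n cs part).getD i dflt =
      (if 1 ≤ i ∧ i ≤ cs.length then cs.getD (i-1) 0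
       else if i = cs.length + 1 then part else 0) := by
  have hlen : (pvPplOf n cs part).length = n := by simp [pvPplOf]
  rw [List.getD_eq_getElem _ _ (by omega)]
  simp [pvPplOf]

lemma pvPplOf_set (n : Nat) (cs : List Int) (part : Int) (h : cs.length + 1 < n) :
    (pvPplOf n cs part).set (cs.length + 1) (part + 1) = pvPplOf n cs (part + 1) := by
  apply List.ext_getElem (by simp [pvPplOf])
  intro i h1 h2
  rw [List.getElem_set]
  simp only [pvPplOf, List.getElem_map, List.getElem_range]
  split_ifs <;> omega

lemma pvPplOf_push (n : Nat) (cs : List Int) (part : Int) :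
    pvPplOf n cs part = pvPplOf n (cs ++ [part]) 0 := by
  apply List.ext_getElem (by simp [pvPplOf])
  intro i h1 h2
  simp only [pvPplOf, List.getElem_map, List.getElem_range, List.length_append,
    List.length_cons, List.length_nil]
  rcases lt_trichotomy i (cs.length + 1) with hi | hi | hi
  · rcases Nat.eq_zero_or_pos i with h0 | h0
    · subst h0; simp
    · have hle : i - 1 < cs.length := by omega
      rw [if_pos ⟨h0, by omega⟩, if_pos ⟨h0, by omega⟩,
        List.getD_append _ _ _ _ hle]
  · subst hi
    rw [if_neg (by omega), if_pos rfl, if_pos (by omega)]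
    have he : cs.length + 1 - 1 = cs.length := by omega
    rw [he, List.getD_eq_getElem _ _ (by simp),
      List.getElem_concat_length rfl]
  · rw [if_neg (by omega), if_neg (by omega), if_neg (by omega)]
    split_ifs <;> rfl

lemma pvLoopA_nil (G : List (List Int)) (st : pvStA) (h : st.q = []) :
    pvLoopA G st = (st.day, PySem.List.pyGetD st.ppl st.day 0) := by
  rw [pvLoopA]
  split
  · rfl
  · rename_i s qt hq
    rw [h] at hq
    cases hq

lemma pvLoopA_cons (G : List (List Int)) (st : pvStA) (s : Int) (qt : List Int)
    (h : st.q = s :: qt) :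
    pvLoopA G st
      = pvLoopA G ((PySem.List.pyGetD G s []).foldl (pvNbA s) { st with q := qt }) := by
  rw [pvLoopA]
  split
  · rename_i hq
    rw [h] at hq
    cases hq
  · rename_i s' qt' hq
    rw [h] at hq
    injection hq with h1 h2
    subst h1
    subst h2
    rfl

-- per-neighbour-list coupling: running A's inner loop is B's inner loop plus the tracked extras
lemma pvInner (G : List (List Int)) (ns : List Int) :
    ∀ (seen : List Bool) (nxt d : List Int) (day mx : Int) (q1 cs : List Int) (s : Int),
    pvInv G seen q1 nxt d cs day mx →
    PySem.Raise.InRange G.length s →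
    seen.getD (pvIx G.length s) false = true →
    d.getD (pvIx G.length s) 0 = (cs.length : Int) →
    ∃ d₂ day₂ mx₂,
      ns.foldl (pvNbA s) ⟨pvEncode seen, day, mx, pvPplOf G.length cs nxt.length, d, q1 ++ nxt⟩
        = ⟨pvEncode (ns.foldl pvNbB (seen, nxt)).1, day₂, mx₂,
           pvPplOf G.length cs ((ns.foldl pvNbB (seen, nxt)).2.length), d₂,
           q1 ++ (ns.foldl pvNbB (seen, nxt)).2⟩ ∧
      pvInv G (ns.foldl pvNbB (seen, nxt)).1 q1 (ns.foldl pvNbB (seen, nxt)).2 d₂ cs day₂ mx₂ ∧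
      (ns.foldl pvNbB (seen, nxt)).1.getD (pvIx G.length s) false = true ∧
      d₂.getD (pvIx G.length s) 0 = (cs.length : Int) := by
  induction ns with
  | nil =>
      intro seen nxt d day mx q1 cs s hInv hsr hseen hds
      exact ⟨d, day, mx, rfl, hInv, hseen, hds⟩
  | cons u t ih =>
      intro seen nxt d day mx q1 cs s hInv hsr hseen hds
      obtain ⟨hlenS, hlenD, hq1, hnxt, hcs, hcnt, hscan⟩ := hInv
      have hlenE : (pvEncode seen).length = G.length := by simp [pvEncode, hlenS]
      by_cases hu : PySem.Raise.InRange G.length u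
      case neg =>
        -- u is not a valid index: both inner loops skip it (the lookup defaults)
        have hA : pvNbA s ⟨pvEncode seen, day, mx, pvPplOf G.length cs nxt.length, d,
            q1 ++ nxt⟩ u = ⟨pvEncode seen, day, mx, pvPplOf G.length cs nxt.length, d,
            q1 ++ nxt⟩ := by
          unfold pvNbA
          rw [if_neg (by rw [pvGetD_out _ _ _ (by rw [hlenE]; exact hu)]; norm_num)]
        have hB : pvNbB (seen, nxt) u = (seen, nxt) := by
          unfold pvNbB
          rw [if_neg (by rw [pvGetD_out _ _ _ (by rw [hlenS]; exact hu)]; simp)]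
        simp only [List.foldl_cons, hA, hB]
        exact ih seen nxt d day mx q1 cs s
          ⟨hlenS, hlenD, hq1, hnxt, hcs, hcnt, hscan⟩ hsr hseen hds
      case pos =>
      have hixu : pvIx G.length u < G.length := pvIx_lt G.length u hu
      have hixuS : pvIx G.length u < seen.length := by omega
      have hgetvis : PySem.List.pyGetD (pvEncode seen) u 1
          = (if seen[pvIx G.length u] then (1:Int) else 0) := by
        rw [pvGetD_eq _ _ _ (by rw [hlenE]; exact hu), hlenE,
          List.getD_eq_getElem _ _ (by rw [hlenE]; exact hixu)]
        simp [pvEncode]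
      have hgetseen : PySem.List.pyGetD seen u true = seen[pvIx G.length u] := by
        rw [pvGetD_eq _ _ _ (by rw [hlenS]; exact hu), hlenS,
          List.getD_eq_getElem _ _ hixuS]
      simp only [List.foldl_cons]
      by_cases hb : seen[pvIx G.length u] = true
      · -- u already seen: both programs skip it
        have hA : pvNbA s ⟨pvEncode seen, day, mx, pvPplOf G.length cs nxt.length, d,
            q1 ++ nxt⟩ u = ⟨pvEncode seen, day, mx, pvPplOf G.length cs nxt.length, d,
            q1 ++ nxt⟩ := by
          unfold pvNbA
          rw [if_neg (by simp [hgetvis, hb])]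
        have hB : pvNbB (seen, nxt) u = (seen, nxt) := by
          unfold pvNbB
          rw [if_neg (by simp [hgetseen, hb])]
        rw [hA, hB]
        exact ih seen nxt d day mx q1 cs s
          ⟨hlenS, hlenD, hq1, hnxt, hcs, hcnt, hscan⟩ hsr hseen hds
      · -- u newly discovered
        have hb' : seen[pvIx G.length u] = false := by simpa using hb
        -- abbreviations
        have hsum : (cs.length : Int) ≤ cs.sum := pvLen_le_sum cs hcs
        have hcpos : 0 < seen.count false :=
          List.count_pos_iff.mpr (hb' ▸ List.getElem_mem hixuS)
        have hLlt : cs.length + 1 < G.length := by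
          have h1 : (1:Int) ≤ (seen.count false : Int) := by exact_mod_cast hcpos
          omega
        have hseen₂ : PySem.List.pySetD seen u true = seen.set (pvIx G.length u) true := by
          rw [pvSetD_eq _ _ _ (by rw [hlenS]; exact hu), hlenS]
        have hEnc : PySem.List.pySetD (pvEncode seen) u 1
            = pvEncode (seen.set (pvIx G.length u) true) := by
          rw [pvSetD_eq _ _ _ (by rw [hlenE]; exact hu), hlenE]
          simp [pvEncode, List.map_set]
        have hdu : PySem.List.pyGetD d s 0 + 1 = (cs.length : Int) + 1 := by
          rw [pvGetD_eq _ _ _ (by rw [hlenD]; exact hsr), hlenD, hds]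
        have hduR : PySem.Raise.InRange G.length ((cs.length : Int) + 1) := by
          constructor <;> push_cast <;> omega
        have hixdu : pvIx G.length ((cs.length : Int) + 1) = cs.length + 1 := by
          simp [pvIx]
          omega
        have hpplLen : (pvPplOf G.length cs (nxt.length : Int)).length = G.length := by
          simp [pvPplOf]
        have hpplR : PySem.Raise.InRange (pvPplOf G.length cs (nxt.length : Int)).length
            ((cs.length : Int) + 1) := by rw [hpplLen]; exact hduR
        have hread : PySem.List.pyGetD (pvPplOf G.length cs (nxt.length : Int))
            ((cs.length : Int) + 1) 0 = (nxt.length : Int) := by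
          rw [pvGetD_eq _ _ _ hpplR, hpplLen, hixdu,
            pvPplOf_getD _ _ _ _ (by omega)]
          rw [if_neg (by omega), if_pos rfl]
        have hset : PySem.List.pySetD (pvPplOf G.length cs (nxt.length : Int))
            ((cs.length : Int) + 1) ((nxt.length : Int) + 1)
            = pvPplOf G.length cs ((nxt.length : Int) + 1) := by
          rw [pvSetD_eq _ _ _ hpplR, hpplLen, hixdu]
          exact pvPplOf_set _ _ _ hLlt
        have hread2 : PySem.List.pyGetD (pvPplOf G.length cs ((nxt.length : Int) + 1))
            ((cs.length : Int) + 1) 0 = (nxt.length : Int) + 1 := by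
          have hpplLen2 : (pvPplOf G.length cs ((nxt.length : Int) + 1)).length
              = G.length := by simp [pvPplOf]
          have hR : PySem.Raise.InRange
              (pvPplOf G.length cs ((nxt.length : Int) + 1)).length
              ((cs.length : Int) + 1) := by rw [hpplLen2]; exact hduR
          rw [pvGetD_eq _ _ _ hR, hpplLen2, hixdu,
            pvPplOf_getD _ _ _ _ (by omega)]
          rw [if_neg (by omega), if_pos rfl]
        -- B's step
        have hB : pvNbB (seen, nxt) u
            = (seen.set (pvIx G.length u) true, nxt ++ [u]) := by
          unfold pvNbB
          rw [if_pos (by simp [hgetseen, hb'])]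
          simp [hseen₂]
        -- A's step
        have hA : pvNbA s ⟨pvEncode seen, day, mx, pvPplOf G.length cs nxt.length, d,
            q1 ++ nxt⟩ u
            = ⟨pvEncode (seen.set (pvIx G.length u) true),
               (if (nxt.length : Int) + 1 > mx then (cs.length : Int) + 1 else day),
               (if (nxt.length : Int) + 1 > mx then (nxt.length : Int) + 1 else mx),
               pvPplOf G.length cs ((nxt.length : Int) + 1),
               PySem.List.pySetD d u ((cs.length : Int) + 1),
               q1 ++ (nxt ++ [u])⟩ := by
          unfold pvNbA
          rw [if_pos (by simp [hgetvis, hb'])]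
          simp only [hdu, hEnc, hset, hread, hread2]
          split_ifs with hgt
          · simp [List.append_assoc]
          · simp [List.append_assoc]
        rw [hA, hB]
        -- the new d array and its lookups
        have hd₂ : PySem.List.pySetD d u ((cs.length : Int) + 1)
            = d.set (pvIx G.length u) ((cs.length : Int) + 1) := by
          rw [pvSetD_eq _ _ _ (by rw [hlenD]; exact hu), hlenD]
        have hlenD₂ : (d.set (pvIx G.length u) ((cs.length : Int) + 1)).length
            = G.length := by simp [hlenD]
        have hne_of_true : ∀ x, PySem.Raise.InRange G.length x →
            seen.getD (pvIx G.length x) false = true → pvIx G.length x ≠ pvIx G.length u := by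
          intro x hx htrue heq
          have hxlt : pvIx G.length x < seen.length := by
            rw [hlenS]; exact pvIx_lt _ _ hx
          rw [List.getD_eq_getElem _ _ hxlt] at htrue
          have e1 : seen[pvIx G.length x]? = some true := by
            rw [List.getElem?_eq_getElem hxlt, htrue]
          have e2 : seen[pvIx G.length u]? = some false := by
            rw [List.getElem?_eq_getElem hixuS, hb']
          rw [heq, e2] at e1
          simp at e1
        have hpres : ∀ x, PySem.Raise.InRange G.length x →
            seen.getD (pvIx G.length x) false = true →
            (seen.set (pvIx G.length u) true).getD (pvIx G.length x) false = true ∧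
            (d.set (pvIx G.length u) ((cs.length : Int) + 1)).getD (pvIx G.length x) 0
              = d.getD (pvIx G.length x) 0 := by
          intro x hx htrue
          have hne := hne_of_true x hx htrue
          have hxlt := pvIx_lt G.length x hx
          constructor
          · rw [List.getD_eq_getElem _ _ (by rw [List.length_set, hlenS]; exact hxlt),
              List.getElem_set_ne (by omega)]
            rw [List.getD_eq_getElem _ _ (by rw [hlenS]; exact hxlt)] at htrue
            exact htrue
          · rw [List.getD_eq_getElem _ _ (by rw [List.length_set, hlenD]; exact hxlt),
              List.getElem_set_ne (by omega),
              List.getD_eq_getElem _ _ (by rw [hlenD]; exact hxlt)]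
        -- count of unseen vertices drops by one
        have hcnt₂ : ((seen.set (pvIx G.length u) true).count false : Int)
            = (G.length : Int) - (1 + cs.sum + ((nxt ++ [u]).length : Int)) := by
          rw [List.count_set hixuS]
          simp only [hb']
          simp
          have : 1 ≤ seen.count false := hcpos
          push_cast
          push_cast at hcnt
          omega
        -- the tracked (day, maximum) pair follows the scan of the new partial count
        have hscan₂ : ((if (nxt.length : Int) + 1 > mx then (cs.length : Int) + 1 else day),
            (if (nxt.length : Int) + 1 > mx then (nxt.length : Int) + 1 else mx))
            = pvScan (cs ++ [((nxt ++ [u]).length : Int)]) := by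
          have hlen' : ((nxt ++ [u]).length : Int) = (nxt.length : Int) + 1 := by simp
          rw [pvScan_append cs ((nxt.length : Int))] at hscan
          rw [hlen', pvScan_append cs ((nxt.length : Int) + 1)]
          by_cases hx : (nxt.length : Int) > (pvScan cs).2
          · rw [if_pos hx] at hscan
            simp only [Prod.mk.injEq] at hscan
            obtain ⟨hd, hm⟩ := hscan
            rw [if_pos (by omega), if_pos (by omega), if_pos (by omega)]
          · rw [if_neg hx] at hscan
            have hd : day = (pvScan cs).1 := by rw [← hscan]
            have hm : mx = (pvScan cs).2 := by rw [← hscan]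
            by_cases hy : (nxt.length : Int) + 1 > mx
            · rw [if_pos hy, if_pos hy, if_pos (by omega)]
            · rw [if_neg hy, if_neg hy, if_neg (by omega)]
              exact hscan
        -- invariant for the tail, then the induction hypothesis finishes
        have hInv₂ : pvInv G (seen.set (pvIx G.length u) true) q1 (nxt ++ [u])
            (d.set (pvIx G.length u) ((cs.length : Int) + 1)) cs
            (if (nxt.length : Int) + 1 > mx then (cs.length : Int) + 1 else day)
            (if (nxt.length : Int) + 1 > mx then (nxt.length : Int) + 1 else mx) := by
          refine ⟨by simp [hlenS], hlenD₂, ?_, ?_, hcs, hcnt₂, hscan₂⟩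
          · intro x hx
            obtain ⟨hxr, hxs, hxd⟩ := hq1 x hx
            obtain ⟨h1', h2'⟩ := hpres x hxr hxs
            exact ⟨hxr, h1', by rw [h2', hxd]⟩
          · intro x hx
            rcases List.mem_append.mp hx with hx | hx
            · obtain ⟨hxr, hxs, hxd⟩ := hnxt x hx
              obtain ⟨h1', h2'⟩ := hpres x hxr hxs
              exact ⟨hxr, h1', by rw [h2', hxd]⟩
            · have hxu : x = u := by simpa using hx
              subst hxu
              refine ⟨hu, ?_, ?_⟩
              · rw [List.getD_eq_getElem _ _ (by rw [List.length_set, hlenS]; exact hixu),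
                  List.getElem_set_self]
              · rw [List.getD_eq_getElem _ _ (by rw [List.length_set, hlenD]; exact hixu),
                  List.getElem_set_self]
        obtain ⟨hs₂, hd₂s⟩ := hpres s hsr hseen
        obtain ⟨d₃, day₃, mx₃, heq, hinv₃, hseen₃, hds₃⟩ :=
          ih (seen.set (pvIx G.length u) true) (nxt ++ [u])
            (d.set (pvIx G.length u) ((cs.length : Int) + 1))
            (if (nxt.length : Int) + 1 > mx then (cs.length : Int) + 1 else day)
            (if (nxt.length : Int) + 1 > mx then (nxt.length : Int) + 1 else mx)
            q1 cs s hInv₂ hsr hs₂ (by rw [hd₂s, hds])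
        refine ⟨d₃, day₃, mx₃, ?_, hinv₃, hseen₃, hds₃⟩
        simp only [List.length_append, List.length_cons, List.length_nil,
          Nat.cast_add, Nat.cast_one] at heq
        rw [hd₂]
        exact heq

lemma pvMain (K : Nat) : ∀ (G : List (List Int)) (seen : List Bool) (q1 nxt d cs : List Int)
    (day mx : Int),
    Pre_BFS G →
    pvInv G seen q1 nxt d cs day mx →
    2 * (q1.length + nxt.length + seen.count false) + (if q1 = [] then 1 else 0) ≤ K →
    pvLoopA G ⟨pvEncode seen, day, mx, pvPplOf G.length cs nxt.length, d, q1 ++ nxt⟩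
      = pvScan (pvBRest G seen q1 nxt cs) := by
  induction K with
  | zero =>
      intro G seen q1 nxt d cs day mx hpre hInv hK
      exfalso
      rcases q1 with _ | ⟨a, t⟩ <;> simp at hK <;> omega
  | succ K ih =>
      intro G seen q1 nxt d cs day mx hpre hInv hK
      have hn1 : 0 < G.length := List.length_pos_iff.mpr hpre.1
      obtain ⟨hlenS, hlenD, hq1, hnxt, hcs, hcnt, hscan⟩ := hInv
      rcases hq1e : q1 with _ | ⟨s, q1'⟩
      · subst hq1e
        rcases eq_or_ne nxt [] with hnxte | hnne
        · -- queue exhausted: A returns (day, ppl[day]); B scans the finished counts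
          subst hnxte
          rw [List.nil_append, pvLoopA_nil G _ rfl]
          dsimp only
          have hbr : pvBRest G seen [] [] cs = cs := by
            simp [pvBRest]
          rw [hbr]
          simp only [List.length_nil, Nat.cast_zero] at hscan
          rw [pvScan_append] at hscan
          rw [if_neg (by have := pvScan_snd_nonneg cs; omega)] at hscan
          simp only [List.length_nil, Nat.cast_zero]
          rcases eq_or_ne cs [] with hcse | hcse
          · subst hcse
            have hsc : pvScan ([] : List Int) = (-1, 0) := by
              norm_num [pvScan, PySem.List.enumerate_nil]
            rw [hsc] at hscan ⊢
            simp only [Prod.mk.injEq] at hscan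
            obtain ⟨hd, hm⟩ := hscan
            subst hd
            have hR : PySem.Raise.InRange (pvPplOf G.length [] 0).length (-1) := by
              simp [pvPplOf]
              constructor <;> omega
            rw [pvGetD_eq _ _ _ hR]
            have hlenP : (pvPplOf G.length ([] : List Int) 0).length = G.length := by
              simp [pvPplOf]
            rw [hlenP]
            have hix : pvIx G.length (-1) = G.length - 1 := by
              simp [pvIx]
              omega
            rw [hix, pvPplOf_getD _ _ _ _ (by omega)]
            split_ifs <;> simp
          · obtain ⟨k, hk, h1, h2, h3⟩ := pvScan_char cs hcs hcse
            have hsum : (cs.length : Int) ≤ cs.sum := pvLen_le_sum cs hcs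
            have hkn : k + 1 < G.length := by
              simp only [List.length_nil, Nat.cast_zero] at hcnt
              have : (0:Int) ≤ (seen.count false : Int) := by positivity
              omega
            have hday : day = (k : Int) + 1 := by rw [← h1, ← hscan]
            have hmx : mx = cs.getD k 0 := by rw [← h2, ← hscan]
            have hR : PySem.Raise.InRange (pvPplOf G.length cs 0).length day := by
              simp only [pvPplOf, List.length_map, List.length_range]
              rw [hday]
              constructor <;> push_cast <;> omega
            rw [pvGetD_eq _ _ _ hR]
            have hlenP : (pvPplOf G.length cs (0:Int)).length = G.length := by
              simp [pvPplOf]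
            rw [hlenP]
            have hix : pvIx G.length day = k + 1 := by
              rw [hday]
              simp [pvIx]
              omega
            rw [hix, pvPplOf_getD _ _ _ _ hkn, if_pos (by omega)]
            have hk1 : k + 1 - 1 = k := by omega
            rw [hk1, ← hmx]
            exact hscan
        · -- current level exhausted: close its count and start the next frontier
          have hbr : pvBRest G seen [] nxt cs
              = pvBRest G seen nxt [] (cs ++ [(nxt.length : Int)]) := by
            simp only [pvBRest, List.foldl_nil]
            rw [if_neg hnne, pvLoopB_eq_bRest]
            simp only [pvBRest]
          rw [hbr, List.nil_append]
          have hInv₂ : pvInv G seen nxt [] d (cs ++ [(nxt.length : Int)]) day mx := by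
            refine ⟨hlenS, hlenD, ?_, by simp, ?_, ?_, ?_⟩
            · intro x hx
              obtain ⟨h1', h2', h3'⟩ := hnxt x hx
              exact ⟨h1', h2', by rw [h3']; simp⟩
            · intro c hc
              rcases List.mem_append.mp hc with hc | hc
              · exact hcs c hc
              · have hc' : c = (nxt.length : Int) := by simpa using hc
                have hp := List.length_pos_iff.mpr hnne
                rw [hc']
                omega
            · rw [hcnt]
              simp [List.sum_append]
              ring
            · simp only [List.length_nil, Nat.cast_zero]
              rw [pvScan_append (cs ++ [(nxt.length : Int)]) 0,
                if_neg (by have := pvScan_snd_nonneg (cs ++ [(nxt.length : Int)]); omega)]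
              exact hscan
          have hK₂ : 2 * (nxt.length + ([] : List Int).length + seen.count false)
              + (if nxt = [] then 1 else 0) ≤ K := by
            rw [if_neg hnne]
            rw [if_pos rfl] at hK
            simp only [List.length_nil] at *
            omega
          have := ih G seen nxt [] d (cs ++ [(nxt.length : Int)]) day mx hpre hInv₂ hK₂
          rw [List.append_nil] at this
          rw [← this, pvPplOf_push]
          simp
      · -- pop the head of the current level and process its neighbours
        subst hq1e
        obtain ⟨hsr, hss, hsd⟩ := hq1 s (by simp)
        have hInv' : pvInv G seen q1' nxt d cs day mx :=
          ⟨hlenS, hlenD, fun x hx => hq1 x (by simp [hx]), hnxt, hcs, hcnt, hscan⟩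
        obtain ⟨d₂, day₂, mx₂, heq, hinv₂, _, _⟩ :=
          pvInner G (PySem.List.pyGetD G s []) seen nxt d day mx q1' cs s hInv' hsr hss hsd
        rw [List.cons_append, pvLoopA_cons G _ s (q1' ++ nxt) rfl]
        dsimp only
        rw [heq]
        have hc := pvCntB_fold (PySem.List.pyGetD G s []) (seen, nxt)
        dsimp only at hc
        have hK₂ : 2 * (q1'.length + (((PySem.List.pyGetD G s []).foldl pvNbB (seen, nxt)).2).length
              + ((PySem.List.pyGetD G s []).foldl pvNbB (seen, nxt)).1.count false)
            + (if q1' = [] then 1 else 0) ≤ K := by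
          rw [if_neg (by simp)] at hK
          simp only [List.length_cons] at hK
          rcases eq_or_ne q1' [] with h | h <;> simp [h] <;> omega
        have := ih G _ q1' _ d₂ cs day₂ mx₂ hpre hinv₂ hK₂
        rw [this]
        have hbr : pvBRest G seen (s :: q1') nxt cs
            = pvBRest G ((PySem.List.pyGetD G s []).foldl pvNbB (seen, nxt)).1 q1'
                ((PySem.List.pyGetD G s []).foldl pvNbB (seen, nxt)).2 cs := by
          simp only [pvBRest, List.foldl_cons, pvStepB]
        rw [hbr]

-- ===== VERDICT (by name: the statement is the Claim_ definition above) =====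
theorem BFS_spec : Claim_equal_BFS := by
  intro G _ hpre
  unfold Spec_BFS BFS BFS_alt
  dsimp only
  have hn1 : 0 < G.length := List.length_pos_iff.mpr hpre.1
  have h0R : PySem.Raise.InRange G.length 0 := ⟨by omega, by exact_mod_cast hn1⟩
  have hseen0 : PySem.List.pySetD (List.replicate G.length false) 0 true
      = (List.replicate G.length false).set 0 true := by
    rw [PySem.List.pySetD_of_nonneg _ _ (by norm_num)]
    norm_num
  have hvis0 : PySem.List.pySetD (List.replicate G.length (0:Int)) 0 1
      = (List.replicate G.length (0:Int)).set 0 1 := by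
    rw [PySem.List.pySetD_of_nonneg _ _ (by norm_num)]
    norm_num
  have hd0 : PySem.List.pySetD (List.replicate G.length ((10:Int)^10)) 0 0
      = (List.replicate G.length ((10:Int)^10)).set 0 0 := by
    rw [PySem.List.pySetD_of_nonneg _ _ (by norm_num)]
    norm_num
  have hEnc0 : (List.replicate G.length (0:Int)).set 0 1
      = pvEncode ((List.replicate G.length false).set 0 true) := by
    simp [pvEncode, List.map_set, List.map_replicate]
  have hppl0 : List.replicate G.length (0:Int) = pvPplOf G.length [] 0 := by
    apply List.ext_getElem (by simp [pvPplOf])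
    intro i h1 h2
    simp only [pvPplOf, List.getElem_map, List.getElem_range, List.getElem_replicate,
      List.length_nil]
    split_ifs <;> simp
  have hix0 : pvIx G.length 0 = 0 := by simp [pvIx]
  have hInv : pvInv G ((List.replicate G.length false).set 0 true) [0] []
      ((List.replicate G.length ((10:Int)^10)).set 0 0) [] (-1) 0 := by
    refine ⟨by simp, by simp, ?_, by simp, by simp, ?_, ?_⟩
    · intro x hx
      have hx0 : x = 0 := by simpa using hx
      subst hx0
      refine ⟨h0R, ?_, ?_⟩
      · rw [hix0, List.getD_eq_getElem _ _ (by simp [hn1]), List.getElem_set_self]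
      · rw [hix0, List.getD_eq_getElem _ _ (by simp [hn1]), List.getElem_set_self]
        simp
    · rw [List.count_set (by simp [hn1])]
      simp [List.count_replicate]
      push_cast
      omega
    · norm_num [pvScan, PySem.List.enumerate_cons, PySem.List.enumerate_nil]
  have hmain := pvMain
    (2 * (([0] : List Int).length + ([] : List Int).length
      + ((List.replicate G.length false).set 0 true).count false)
      + (if ([0] : List Int) = [] then 1 else 0))
    G ((List.replicate G.length false).set 0 true) [0] []
    ((List.replicate G.length ((10:Int)^10)).set 0 0) [] (-1) 0 hpre hInv le_rfl
  rw [hvis0, hd0, hseen0, hEnc0, hppl0, pvLoopB_eq_bRest]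
  simpa using hmain
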